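-- pv_equiv track=rewrite | github.com/aryan7tiwary/explain-cli | src/regex_explainer.py | explain_regex
-- ===== SOURCE A (Python) =====
-- _SPECIAL_MAP = {
--     '^': "start of line",
--     '$': "end of line",
--     '.': "any single character",
--     '*': "zero or more of previous",
--     '+': "one or more of previous",
--     '?': "zero or one (optional)",
--     '|': "alternation (or)",
-- }
--
-- def explain_regex(pattern: str) -> str:
--     """Return a concise human explanation for simple regex patterns.
--
--     This is heuristic and aims to be short and helpful.
--     """
--     try:
--         # Basic high-level cases
--         explanation_parts = []
--         if pattern.startswith('^'):
--             explanation_parts.append(_SPECIAL_MAP['^'])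
--             pattern = pattern[1:]
--         if pattern.endswith('$'):
--             explanation_parts.append(_SPECIAL_MAP['$'])
--             pattern = pattern[:-1]
--
--         # Character class like ^-[A-Z]
--         desc = None
--         if pattern.startswith('[') and pattern.endswith(']'):
--             content = pattern[1:-1]
--             if content.startswith('^'):
--                 desc = f"not any of '{content[1:]}'"
--             else:
--                 desc = f"one of '{content}'"
--         elif pattern.startswith('\\') and len(pattern) == 2:
--             # escaped single char
--             desc = f"literal '{pattern[1:]}'"
--         elif pattern:
--             # Plain text or simple metachars
--             human = []
--             i = 0
--             while i < len(pattern):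
--                 ch = pattern[i]
--                 nxt = pattern[i+1] if i+1 < len(pattern) else ''
--                 if ch == '[':
--                     j = pattern.find(']', i+1)
--                     if j != -1:
--                         cls = pattern[i+1:j]
--                         if cls.startswith('^'):
--                             human.append(f"not any of '{cls[1:]}'")
--                         else:
--                             human.append(f"one of '{cls}'")
--                         i = j + 1
--                         continue
--                 if ch in _SPECIAL_MAP:
--                     human.append(_SPECIAL_MAP[ch])
--                 elif ch == '\\' and nxt:
--                     human.append(f"literal '{nxt}'")
--                     i += 1
--                 else:
--                     human.append(f"'{ch}'")
--                 i += 1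
--             if human:
--                 desc = ", ".join(human)
--
--         if desc:
--             if explanation_parts:
--                 return f"{', '.join(explanation_parts)}, then {desc}"
--             return desc
--         return "regular expression pattern"
--     except Exception:
--         return "regular expression pattern"
-- ===== SOURCE B (Python) =====
-- _SPECIAL_MAP = {
--     '^': "start of line",
--     '$': "end of line",
--     '.': "any single character",
--     '*': "zero or more of previous",
--     '+': "one or more of previous",
--     '?': "zero or one (optional)",
--     '|': "alternation (or)",
-- }
--
--
-- def _cls(content):
--     if content[:1] == '^':
--         return "not any of '%s'" % content[1:]
--     return "one of '%s'" % content
--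
--
-- def _step(s):
--     """Describe the first token of s; return (description, remainder)."""
--     ch, rest = s[0], s[1:]
--     if ch == '[':
--         head, sep, tail = rest.partition(']')
--         if sep:
--             return _cls(head), tail
--     if ch == '\\' and rest:
--         return "literal '%s'" % rest[0], rest[1:]
--     return _SPECIAL_MAP.get(ch, "'%s'" % ch), rest
--
--
-- def explain_regex(pattern: str) -> str:
--     """Return a concise human explanation for simple regex patterns."""
--     pre = ""
--     if pattern[:1] == '^':
--         pre = _SPECIAL_MAP['^']
--         pattern = pattern[1:]
--     if pattern and pattern[-1] == '$':
--         pre += (", " if pre else "") + _SPECIAL_MAP['$']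
--         pattern = pattern[:-1]
--
--     if pattern[:1] == '[' and pattern and pattern[-1] == ']':
--         desc = _cls(pattern[1:-1])
--     elif len(pattern) == 2 and pattern[0] == '\\':
--         desc = "literal '%s'" % pattern[1]
--     else:
--         buf = []
--         rest = pattern
--         while rest:
--             d, rest = _step(rest)
--             buf.append(d)
--             if rest:
--                 buf.append(", ")
--         desc = "".join(buf)
--
--     if not desc:
--         return "regular expression pattern"
--     return pre + ", then " + desc if pre else desc
-- ===== Notes on version B (the rewrite author's own statement) =====
-- stated objective: alternative
-- what changed: Replaced A's monolithic index-based while loop (manual i arithmetic, in-loop find and continue, parts list joined at the end) by a step-function decomposition: a _step helper that describes one leading token and returns the remainder (str.partition for classes, dict .get with a quoting default), driven by a loop that consumes the string and emits the separator inline; the anchor prefix is built by string concatenation instead of a joined list.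
import Mathlib
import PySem

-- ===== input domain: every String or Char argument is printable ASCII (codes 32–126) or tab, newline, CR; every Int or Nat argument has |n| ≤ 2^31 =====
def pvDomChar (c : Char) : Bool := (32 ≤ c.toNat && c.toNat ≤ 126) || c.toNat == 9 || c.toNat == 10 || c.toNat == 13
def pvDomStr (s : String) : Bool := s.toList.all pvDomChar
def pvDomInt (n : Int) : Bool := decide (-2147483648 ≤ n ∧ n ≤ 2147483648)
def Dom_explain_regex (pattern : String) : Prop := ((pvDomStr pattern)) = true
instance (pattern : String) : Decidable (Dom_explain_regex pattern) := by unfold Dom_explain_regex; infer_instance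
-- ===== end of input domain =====

-- B replaces A's monolithic index-while loop (find/continue/i arithmetic, list of parts
-- joined at the end) by a step-function decomposition: a tokenize-and-describe step
-- consuming the front of the string (partition for classes, dict .get with default),
-- separators emitted inline; return value proved equal (objective: alternative).

-- ===== PORT A =====

-- _SPECIAL_MAP (module-level dict with one-char keys; A's `ch in` / `[ch]` lookup ported as a chained-if function)
def specialDesc (c : Char) : Option (List Char) :=
  if c = '^' then some "start of line".toList
  else if c = '$' then some "end of line".toList
  else if c = '.' then some "any single character".toList
  else if c = '*' then some "zero or more of previous".toList
  else if c = '+' then some "one or more of previous".toList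
  else if c = '?' then some "zero or one (optional)".toList
  else if c = '|' then some "alternation (or)".toList
  else none

-- pattern.find(']', i+1) on the tail: split at first ']' (none = -1).
def findSplit : List Char → Option (List Char × List Char)
  | [] => none
  | c :: cs =>
    if c = ']' then some ([], cs)
    else (findSplit cs).map (fun pr => (c :: pr.1, pr.2))

-- needed for termination of the scan loop
theorem findSplit_length : ∀ (cs a b : List Char), findSplit cs = some (a, b) → b.length < cs.length := by
  intro cs
  induction cs with
  | nil => intro a b h; simp [findSplit] at h
  | cons c cs ih =>
    intro a b h
    by_cases hc : c = ']'
    · simp [findSplit, hc] at h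
      simp [← h.2]
    · simp only [findSplit, hc, if_false, Option.map_eq_some_iff] at h
      obtain ⟨⟨x, y⟩, hxy, hx⟩ := h
      have := ih x y hxy
      simp only [Prod.mk.injEq] at hx
      obtain ⟨-, hx2⟩ := hx
      subst hx2
      simp
      omega

-- the while-loop of A: each step emits one description and advances i
def scanA (p : List Char) : List (List Char) :=
  match p with
  | [] => []
  | c :: rest =>
    if c = '[' then
      match h : findSplit rest with
      | some (cls, rest') =>
        -- cls.startswith('^') ported as head? check; cls[1:] as tail
        (if cls.head? = some '^' then "not any of '".toList ++ cls.tail ++ ['\'']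
         else "one of '".toList ++ cls ++ ['\'']) :: scanA rest'
      | none =>
        -- find returned -1; '[' is not in _SPECIAL_MAP and is not '\\', so the else-branch quotes it
        ('\'' :: c :: ['\'']) :: scanA rest
    else
      match specialDesc c with
      | some d => d :: scanA rest
      | none =>
        if c = '\\' then
          match rest with
          | n :: rest' => ("literal '".toList ++ [n] ++ ['\'']) :: scanA rest'
          | [] => ('\'' :: c :: ['\'']) :: scanA []   -- nxt == '' is falsy: quote the backslash
        else ('\'' :: c :: ['\'']) :: scanA rest
termination_by p.length
decreasing_by
  · exact Nat.lt_succ_of_lt (findSplit_length rest cls rest' h)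
  all_goals simp

-- the if/elif/elif chain computing `desc` (None = Option.none)
def descA (p : List Char) : Option (List Char) :=
  if p.head? = some '[' ∧ p.getLast? = some ']' then
    -- content = pattern[1:-1]  (slice ported exactly as drop 1 then dropLast)
    some (if ((p.drop 1).dropLast).head? = some '^' then
            "not any of '".toList ++ ((p.drop 1).dropLast).tail ++ ['\'']
          else "one of '".toList ++ (p.drop 1).dropLast ++ ['\''])
  else if p.head? = some '\\' ∧ p.length = 2 then
    some ("literal '".toList ++ p.drop 1 ++ ['\''])   -- pattern[1:] = the single char pattern[1] here
  else if p ≠ [] then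
    let human := scanA p
    if human ≠ [] then some (PySem.Chars.join ", ".toList human) else none
  else none

def explain_regex (pattern : String) : String :=
  let p0 := pattern.toList
  -- if pattern.startswith('^') / if pattern.endswith('$')
  let st1 : List (List Char) × List Char :=
    if p0.head? = some '^' then (["start of line".toList], p0.tail) else ([], p0)
  let st2 : List (List Char) × List Char :=
    if st1.2.getLast? = some '$' then (st1.1 ++ ["end of line".toList], st1.2.dropLast) else st1
  match descA st2.2 with
  | some d =>
    if d ≠ [] then   -- `if desc:` truthiness
      if st2.1 ≠ [] then
        String.mk (PySem.Chars.join ", ".toList st2.1 ++ ", then ".toList ++ d)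
      else String.mk d
    else "regular expression pattern"
  | none => "regular expression pattern"

-- ===== PORT B =====

-- B's _SPECIAL_MAP as an association list; Source B looks a char up with .get(ch, default)
def specialB : List (Char × List Char) :=
  [('^', "start of line".toList), ('$', "end of line".toList),
   ('.', "any single character".toList), ('*', "zero or more of previous".toList),
   ('+', "one or more of previous".toList), ('?', "zero or one (optional)".toList),
   ('|', "alternation (or)".toList)]

-- _cls: content[:1] == '^' ported as a pattern match on the list
def clsB : List Char → List Char
  | '^' :: t => "not any of '".toList ++ t ++ ['\'']
  | content => "one of '".toList ++ content ++ ['\'']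

-- _step: describe the first token, return (description, remainder).
-- rest.partition(']') ported as takeWhile/dropWhile at the first ']' (sep truthy ↔ ']' ∈ rest).
def stepB : List Char → List Char × List Char
  | [] => ([], [])   -- unreachable: the loop only calls _step on nonempty strings
  | ch :: rest =>
    if ch = '[' ∧ ']' ∈ rest then
      (clsB (rest.takeWhile (· ≠ ']')), (rest.dropWhile (· ≠ ']')).tail)
    else if ch = '\\' ∧ rest ≠ [] then
      ("literal '".toList ++ rest.take 1 ++ ['\''], rest.tail)
    else
      ((specialB.lookup ch).getD (['\''] ++ [ch] ++ ['\'']), rest)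

-- the `while rest:` loop of Source B: one _step per turn, ", " appended when more remains
def joinStepsB (p : List Char) : List Char :=
  match p with
  | [] => []
  | c :: rest0 =>
    let st := stepB (c :: rest0)
    st.1 ++ (if st.2 = [] then [] else ", ".toList ++ joinStepsB st.2)
termination_by p.length
decreasing_by
  simp only [stepB]
  split_ifs with h1 h2
  · have h := List.length_dropWhile_le (p := fun c => decide (c ≠ ']')) (l := rest0)
    simp only [List.length_cons, List.length_tail]
    omega
  · simp only [List.length_cons, List.length_tail]
    omega
  · simp

def explain_regex_alt (pattern : String) : String :=
  let p0 := pattern.toList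
  -- pre = ""; if pattern[:1] == '^': …; if pattern and pattern[-1] == '$': …
  let s1 : List Char × List Char :=
    if p0.take 1 = ['^'] then ("start of line".toList, p0.drop 1) else ([], p0)
  let s2 : List Char × List Char :=
    if s1.2.getLast? = some '$' then
      (s1.1 ++ (if s1.1 = [] then [] else ", ".toList) ++ "end of line".toList, s1.2.dropLast)
    else s1
  let desc : List Char :=
    if s2.2.take 1 = ['['] ∧ s2.2.getLast? = some ']' then
      clsB ((s2.2.drop 1).dropLast)
    else if s2.2.length = 2 ∧ s2.2.take 1 = ['\\'] then
      "literal '".toList ++ (s2.2.drop 1).take 1 ++ ['\'']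
    else joinStepsB s2.2
  if desc = [] then "regular expression pattern"
  else if s2.1 = [] then String.mk desc
  else String.mk (s2.1 ++ ", then ".toList ++ desc)

-- ===== PRECONDITION & SPEC =====
def Spec_explain_regex (pattern : String) (out : String) : Prop := out = explain_regex_alt pattern
instance (pattern : String) (out : String) : Decidable (Spec_explain_regex pattern out) := by unfold Spec_explain_regex; infer_instance

-- ===== CLAIM (what is proved, stated in full; the proofs are below) =====
def Claim_equal_explain_regex : Prop := ∀ (pattern : String), Dom_explain_regex pattern → Spec_explain_regex pattern (explain_regex pattern)

-- ===== LEMMAS AND PROOFS =====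

-- the B-side desc expression, named for the proofs (definitionally the `desc` let of explain_regex_alt)
def dB (q : List Char) : List Char :=
  if q.take 1 = ['['] ∧ q.getLast? = some ']' then
    clsB ((q.drop 1).dropLast)
  else if q.length = 2 ∧ q.take 1 = ['\\'] then
    "literal '".toList ++ (q.drop 1).take 1 ++ ['\'']
  else joinStepsB q

theorem dB_def (q : List Char) :
    dB q = (if q.take 1 = ['['] ∧ q.getLast? = some ']' then
              clsB ((q.drop 1).dropLast)
            else if q.length = 2 ∧ q.take 1 = ['\\'] then
              "literal '".toList ++ (q.drop 1).take 1 ++ ['\'']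
            else joinStepsB q) := rfl

theorem take1_eq_iff {l : List Char} {c : Char} : l.take 1 = [c] ↔ l.head? = some c := by
  cases l <;> simp

theorem clsB_eq (x : List Char) :
    clsB x = (if x.head? = some '^' then "not any of '".toList ++ x.tail ++ ['\'']
              else "one of '".toList ++ x ++ ['\'']) := by
  match x with
  | [] => rfl
  | c :: t =>
    by_cases hc : c = '^'
    · subst hc; rfl
    · have h1 : ¬ ((c :: t).head? = some '^') := by simpa using hc
      rw [if_neg h1]
      cases t <;> simp [clsB, hc]

theorem clsB_ne_nil (x : List Char) : clsB x ≠ [] := by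
  rw [clsB_eq]; split_ifs <;> simp

theorem findSplit_of_not_mem : ∀ {l : List Char}, ']' ∉ l → findSplit l = none := by
  intro l
  induction l with
  | nil => intro _; rfl
  | cons c cs ih =>
    intro h
    have hc : ¬ c = ']' := fun hh => h (hh ▸ List.mem_cons_self)
    have hcs : ']' ∉ cs := fun hh => h (List.mem_cons_of_mem _ hh)
    simp [findSplit, hc, ih hcs]

theorem findSplit_of_mem : ∀ {l : List Char}, ']' ∈ l →
    findSplit l = some (l.takeWhile (· ≠ ']'), (l.dropWhile (· ≠ ']')).tail) := by
  intro l
  induction l with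
  | nil => intro h; simp at h
  | cons c cs ih =>
    intro h
    by_cases hc : c = ']'
    · subst hc; simp [findSplit, List.takeWhile, List.dropWhile]
    · have hcs : ']' ∈ cs := by
        rcases List.mem_cons.mp h with h1 | h1
        · exact absurd h1.symm hc
        · exact h1
      simp [findSplit, hc, ih hcs, List.takeWhile, List.dropWhile]

theorem lookup_specialB (c : Char) : specialB.lookup c = specialDesc c := by
  unfold specialB specialDesc
  by_cases h1 : c = '^'; · subst h1; rfl
  by_cases h2 : c = '$'; · subst h2; rfl
  by_cases h3 : c = '.'; · subst h3; rfl
  by_cases h4 : c = '*'; · subst h4; rfl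
  by_cases h5 : c = '+'; · subst h5; rfl
  by_cases h6 : c = '?'; · subst h6; rfl
  by_cases h7 : c = '|'; · subst h7; rfl
  have e1 : (c == '^') = false := by simp [h1]
  have e2 : (c == '$') = false := by simp [h2]
  have e3 : (c == '.') = false := by simp [h3]
  have e4 : (c == '*') = false := by simp [h4]
  have e5 : (c == '+') = false := by simp [h5]
  have e6 : (c == '?') = false := by simp [h6]
  have e7 : (c == '|') = false := by simp [h7]
  simp [List.lookup, e1, e2, e3, e4, e5, e6, e7, h1, h2, h3, h4, h5, h6, h7]

theorem scanA_nil : scanA [] = [] := by rw [scanA.eq_def]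

theorem scanA_cls {rest cls rest' : List Char} (hfs : findSplit rest = some (cls, rest')) :
    scanA ('[' :: rest) = clsB cls :: scanA rest' := by
  rw [clsB_eq]
  conv_lhs => rw [scanA.eq_def]
  simp only [if_true]
  split
  · rename_i a b h
    rw [hfs] at h; injection h with h; rw [Prod.mk.injEq] at h
    obtain ⟨h1, h2⟩ := h; subst h1; subst h2; rfl
  · rename_i h
    rw [hfs] at h; simp at h

theorem scanA_cls_none {rest : List Char} (hfs : findSplit rest = none) :
    scanA ('[' :: rest) = ['\'', '[', '\''] :: scanA rest := by
  conv_lhs => rw [scanA.eq_def]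
  simp only [if_true]
  split
  · rename_i a b h
    rw [hfs] at h; simp at h
  · rfl

theorem scanA_special {c : Char} {rest : List Char} {d : List Char}
    (hc : ¬ c = '[') (hs : specialDesc c = some d) :
    scanA (c :: rest) = d :: scanA rest := by
  conv_lhs => rw [scanA.eq_def]
  simp only [if_neg hc, hs]

theorem scanA_esc {n : Char} {rest : List Char} :
    scanA ('\\' :: n :: rest) = ("literal '".toList ++ [n] ++ ['\'']) :: scanA rest := by
  conv_lhs => rw [scanA.eq_def]
  simp [show specialDesc '\\' = none from rfl]

theorem scanA_esc_nil : scanA ['\\'] = [['\'', '\\', '\'']] := by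
  conv_lhs => rw [scanA.eq_def]
  simp [show specialDesc '\\' = none from rfl, scanA_nil]

theorem scanA_plain {c : Char} {rest : List Char}
    (hc : ¬ c = '[') (hs : specialDesc c = none) (hcb : ¬ c = '\\') :
    scanA (c :: rest) = ['\'', c, '\''] :: scanA rest := by
  conv_lhs => rw [scanA.eq_def]
  simp only [if_neg hc, hs, if_neg hcb]

-- scanA's first emission and advance are exactly B's _step
theorem scanA_step (c : Char) (rest : List Char) :
    scanA (c :: rest) = (stepB (c :: rest)).1 :: scanA ((stepB (c :: rest)).2) := by
  by_cases hc : c = '['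
  · subst hc
    by_cases hm : ']' ∈ rest
    · rw [scanA_cls (findSplit_of_mem hm)]
      simp [stepB, hm]
    · rw [scanA_cls_none (findSplit_of_not_mem hm)]
      simp [stepB, hm, lookup_specialB, show specialDesc '[' = none from rfl]
  · by_cases hb : c = '\\'
    · subst hb
      cases rest with
      | nil =>
        rw [scanA_esc_nil]
        simp [stepB, scanA_nil, lookup_specialB, show specialDesc '\\' = none from rfl]
      | cons n rest' =>
        rw [scanA_esc]
        simp [stepB, show ¬ ('\\' : Char) = '[' from by decide]
    · cases hs : specialDesc c with
      | some d =>
        rw [scanA_special hc hs]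
        simp [stepB, hc, hb, lookup_specialB, hs]
      | none =>
        rw [scanA_plain hc hs hb]
        simp [stepB, hc, hb, lookup_specialB, hs]

theorem stepB_fst_ne_nil (c : Char) (rest : List Char) : (stepB (c :: rest)).1 ≠ [] := by
  simp only [stepB]
  split_ifs with h1 h2
  · exact clsB_ne_nil _
  · simp
  · rw [lookup_specialB]
    unfold specialDesc
    split_ifs <;> simp

theorem joinStepsB_cons_ne_nil (c : Char) (rest : List Char) : joinStepsB (c :: rest) ≠ [] := by
  rw [joinStepsB.eq_def]
  simp only []
  intro h
  rcases List.append_eq_nil_iff.mp h with ⟨h1, -⟩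
  exact stepB_fst_ne_nil c rest h1

theorem join_cons_shape (sep d : List Char) (ds : List (List Char)) :
    PySem.Chars.join sep (d :: ds) =
      d ++ (if ds = [] then [] else sep ++ PySem.Chars.join sep ds) := by
  cases ds with
  | nil => simp [PySem.Chars.join_singleton]
  | cons e r => simp [PySem.Chars.join_cons_cons]

-- B's separator-emitting loop computes exactly the ", ".join of A's parts list
theorem joinStepsB_eq_aux : ∀ (n : Nat) (p : List Char), p.length ≤ n →
    joinStepsB p = PySem.Chars.join ", ".toList (scanA p) := by
  intro n
  induction n with
  | zero =>
    intro p hp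
    have hp0 : p = [] := by cases p <;> simp_all
    subst hp0
    rw [scanA_nil, PySem.Chars.join_nil, joinStepsB.eq_def]
  | succ n ih =>
    intro p hp
    match p with
    | [] => rw [scanA_nil, PySem.Chars.join_nil, joinStepsB.eq_def]
    | c :: rest =>
      have hlt : ((stepB (c :: rest)).2).length ≤ n := by
        have hle : ((stepB (c :: rest)).2).length ≤ rest.length := by
          simp only [stepB]
          split_ifs
          · have := List.length_dropWhile_le (p := fun x => decide (x ≠ ']')) (l := rest)
            simp only [List.length_tail]
            omega
          · simp only [List.length_tail]
            omega
          · exact le_rfl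
        simp only [List.length_cons, Nat.succ_le_succ_iff] at hp
        omega
      rw [scanA_step, join_cons_shape]
      conv_lhs => rw [joinStepsB.eq_def]
      simp only []
      congr 1
      cases hr : (stepB (c :: rest)).2 with
      | nil => rw [scanA_nil]; simp
      | cons d r =>
        have hne : scanA (d :: r) ≠ [] := by rw [scanA_step]; simp
        rw [if_neg hne, if_neg (by simp : ¬ (d :: r) = [])]
        rw [← hr, ih _ hlt, hr]

theorem joinStepsB_eq (p : List Char) :
    joinStepsB p = PySem.Chars.join ", ".toList (scanA p) :=
  joinStepsB_eq_aux p.length p le_rfl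

-- descA and B's desc expression agree: None ↔ empty string, some d ↔ the same nonempty d
theorem descA_dB (q : List Char) :
    descA q = (if dB q = [] then none else some (dB q)) := by
  by_cases h1 : q.head? = some '[' ∧ q.getLast? = some ']'
  · have hB : dB q = clsB ((q.drop 1).dropLast) := by
      rw [dB_def, if_pos ⟨take1_eq_iff.mpr h1.1, h1.2⟩]
    rw [hB, if_neg (clsB_ne_nil _)]
    simp only [descA]
    rw [if_pos h1, ← clsB_eq]
  · have hA1 : ¬ (q.take 1 = ['['] ∧ q.getLast? = some ']') :=
      fun h => h1 ⟨take1_eq_iff.mp h.1, h.2⟩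
    by_cases h2 : q.head? = some '\\' ∧ q.length = 2
    · have hB : dB q = "literal '".toList ++ q.drop 1 ++ ['\''] := by
        rw [dB_def, if_neg hA1, if_pos ⟨h2.2, take1_eq_iff.mpr h2.1⟩]
        rw [List.take_of_length_le (by simp [h2.2])]
      rw [hB, if_neg (by simp)]
      simp only [descA]
      rw [if_neg h1, if_pos h2]
    · have hB2 : ¬ (q.length = 2 ∧ q.take 1 = ['\\']) :=
        fun h => h2 ⟨take1_eq_iff.mp h.2, h.1⟩
      have hB : dB q = joinStepsB q := by rw [dB_def, if_neg hA1, if_neg hB2]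
      rw [hB]
      simp only [descA]
      rw [if_neg h1, if_neg h2]
      cases q with
      | nil => simp [joinStepsB.eq_def]
      | cons c rest =>
        rw [if_pos (by simp)]
        have hj := joinStepsB_eq (c :: rest)
        have hne := joinStepsB_cons_ne_nil c rest
        have hs : scanA (c :: rest) ≠ [] := by
          intro h
          rw [h, PySem.Chars.join_nil] at hj
          exact hne hj
        rw [if_pos hs, if_neg hne, hj]

-- the common tail of both programs, abstracted over the prefix stage
theorem key_tail (parts : List (List Char)) (pre q : List Char)
    (hpre : pre = PySem.Chars.join ", ".toList parts) (hiff : pre = [] ↔ parts = []) :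
    (match descA q with
     | some d =>
       if d ≠ [] then
         if parts ≠ [] then
           String.mk (PySem.Chars.join ", ".toList parts ++ ", then ".toList ++ d)
         else String.mk d
       else "regular expression pattern"
     | none => "regular expression pattern")
    = (if dB q = [] then ("regular expression pattern" : String)
       else if pre = [] then String.mk (dB q)
       else String.mk (pre ++ ", then ".toList ++ dB q)) := by
  rw [descA_dB]
  by_cases hd : dB q = []
  · simp [hd]
  · rw [if_neg hd, if_neg hd]
    simp only []
    rw [if_pos hd]
    by_cases hp : pre = []
    · rw [if_pos hp, if_neg (by simp [hiff.mp hp])]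
    · rw [if_neg hp, if_pos (show parts ≠ [] from fun h => hp (hiff.mpr h)), hpre]

theorem explain_regex_spec : Claim_equal_explain_regex := by
  intro pattern _
  unfold Spec_explain_regex explain_regex explain_regex_alt
  generalize pattern.toList = p0
  simp only []
  rw [← dB_def, List.drop_one]
  by_cases hh : p0.head? = some '^'
  · rw [if_pos hh, if_pos (take1_eq_iff.mpr hh)]
    dsimp only
    by_cases hd : p0.tail.getLast? = some '$'
    · rw [if_pos hd, if_pos hd]
      dsimp only
      exact key_tail _ _ _ (by rfl) (by simp)
    · rw [if_neg hd, if_neg hd]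
      dsimp only
      exact key_tail _ _ _ (by rfl) (by simp)
  · rw [if_neg hh, if_neg (fun h => hh (take1_eq_iff.mp h))]
    dsimp only
    by_cases hd : p0.getLast? = some '$'
    · rw [if_pos hd, if_pos hd]
      dsimp only
      exact key_tail _ _ _ (by rfl) (by simp)
    · rw [if_neg hd, if_neg hd]
      dsimp only
      exact key_tail _ _ _ (by rfl) (by simp)
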